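-- pv_equiv track=rewrite | github.com/SimoneMarretta/ADM-HW5 | MyGraph.py | route_edges
-- ===== SOURCE A (Python) =====
-- from collections import defaultdict
-- from itertools import cycle
--
-- def route_edges(path):
--     ''' Function return dictiony where keys are colors and values are edges.
--     Moving element wise of path we can see if previous edge is equal to reverse
--     of current edge then it means that we reached a leave so we can change color to emphasize
--     moving bacward
--     '''
--     colors = cycle(['r','b', 'g'])
--     cur_color = next(colors)
--     edges = defaultdict(list)
--     for i in range(len(path)-1):
--         e = (path[i], path[i+1])
--         if edges[cur_color] and set(e) == set(edges[cur_color][-1]):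
--             cur_color = next(colors)
--         edges[cur_color].append(e)
--
--     return edges
-- ===== SOURCE B (Python) =====
-- from collections import defaultdict
--
--
-- def route_edges(path):
--     # Different algorithm: a reversal happens at edge i (i >= 1) exactly when
--     # path[i-1] == path[i+1] (consecutive edges share path[i], so their vertex
--     # sets coincide iff the outer endpoints coincide).  So first split the
--     # edge sequence into maximal runs at these palindromic triples, then
--     # color the runs cyclically by their position and group edges by color.
--     runs = []
--     run = []
--     for a, b, c in zip(path, path[1:], path[2:]):
--         run.append((a, b))
--         if a == c:
--             runs.append(run)
--             run = []
--     if len(path) >= 2: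
--         run.append((path[-2], path[-1]))
--     if run:
--         runs.append(run)
--     colors = ['r', 'b', 'g']
--     edges = defaultdict(list)
--     k = 0
--     for r in runs:
--         color = colors[k % 3]
--         for e in r:
--             edges[color].append(e)
--         k += 1
--     return edges
-- ===== Notes on version B (the rewrite author's own statement) =====
-- stated objective: alternative
-- what changed: Replaces A's stateful scan (cycle iterator advanced by comparing each edge as an unordered pair with the last edge stored under the current color inside the growing defaultdict) by a run-splitting algorithm: reversals are detected purely on the path as palindromic triples path[i-1]==path[i+1] (no edge-set comparison, no dict state), the edge sequence is partitioned into maximal runs at those points, and the runs are then colored cyclically by their position and grouped.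
import Mathlib
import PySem

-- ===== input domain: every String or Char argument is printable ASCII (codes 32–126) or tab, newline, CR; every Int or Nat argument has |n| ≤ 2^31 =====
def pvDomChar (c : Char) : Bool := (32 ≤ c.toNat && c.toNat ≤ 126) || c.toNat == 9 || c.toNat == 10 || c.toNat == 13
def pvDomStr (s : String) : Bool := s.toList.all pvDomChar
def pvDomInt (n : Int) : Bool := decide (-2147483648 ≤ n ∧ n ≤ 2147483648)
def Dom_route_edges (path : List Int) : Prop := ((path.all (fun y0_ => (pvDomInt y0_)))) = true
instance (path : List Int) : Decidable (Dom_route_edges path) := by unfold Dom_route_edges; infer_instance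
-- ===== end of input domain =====

-- B replaces A's stateful color-cycling scan (set-comparison against the last edge stored in the
-- dict) by a run-splitting algorithm: reversal points are palindromic triples path[i-1]==path[i+1],
-- the edge list is split into maximal runs there, and runs are colored cyclically by position
-- (alternative decomposition, same asymptotic cost).

-- ===== PORT A =====
-- set(e) == set(p) for pairs e, p
def pvSetEq (e p : Int × Int) : Bool :=
  (e.1 == p.1 && e.2 == p.2) || (e.1 == p.2 && e.2 == p.1)

-- next() on itertools.cycle modelled as a rotating list
def pvCycleNext (l : List String) : String × List String :=
  match l with
  | [] => ("", [])
  | c :: rest => (c, rest ++ [c])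

-- loop body of A (after e = (path[i], path[i+1]) has been formed)
def pvStepA (st : String × List String × PySem.Dict String (List (Int × Int)))
    (e : Int × Int) : String × List String × PySem.Dict String (List (Int × Int)) :=
  let cur := st.1
  let colors := st.2.1
  let edges := (st.2.2).setdefault cur []           -- edges[cur_color] materialises the key
  let cl := edges.getD cur []
  if (!cl.isEmpty) && pvSetEq e (cl.getLastD (0, 0)) then
    let nxt := pvCycleNext colors
    (nxt.1, nxt.2, edges.modify nxt.1 [] (· ++ [e]))  -- edges[cur_color].append(e)
  else
    (cur, colors, edges.modify cur [] (· ++ [e]))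

def route_edges (path : List Int) : List (String × List (Int × Int)) :=
  -- cur_color = next(colors) is (pvCycleNext ["r","b","g"]).1, the advanced cycle its .2
  ((PySem.List.pyRange 0 ((path.length : Int) - 1) 1).foldl
      (fun st i =>
        pvStepA st (PySem.List.pyGetD path i 0, PySem.List.pyGetD path (i + 1) 0))
      ((pvCycleNext ["r", "b", "g"]).1, (pvCycleNext ["r", "b", "g"]).2,
        PySem.Dict.empty)).2.2.items

-- ===== PORT B =====
-- colors[k % 3] for colors = ['r','b','g']
def pvColorOf (k : Int) : String :=
  (PySem.List.pyGet? ["r", "b", "g"] (PySem.Int.mod k 3)).getD ""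

-- body of B's first loop over zip(path, path[1:], path[2:]); state (runs, run)
def pvStepR (st : List (List (Int × Int)) × List (Int × Int)) (t : (Int × Int) × Int) :
    List (List (Int × Int)) × List (Int × Int) :=
  let run := st.2 ++ [(t.1.1, t.1.2)]
  if t.1.1 == t.2 then (st.1 ++ [run], []) else (st.1, run)

def route_edges_alt (path : List Int) : List (String × List (Int × Int)) :=
  let st := ((path.zip (PySem.List.slice path (some 1) none)).zip
      (PySem.List.slice path (some 2) none)).foldl pvStepR ([], [])
  let run := if 2 ≤ path.length then
      st.2 ++ [(PySem.List.pyGetD path (-2) 0, PySem.List.pyGetD path (-1) 0)]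
    else st.2
  let runs := if run.isEmpty then st.1 else st.1 ++ [run]
  -- second loop: color the runs cyclically by position and append their edges
  ((runs.foldl
      (fun st2 r =>
        (st2.1 + 1, r.foldl (fun d e => d.modify (pvColorOf st2.1) [] (· ++ [e])) st2.2))
      ((0 : Int), (PySem.Dict.empty : PySem.Dict String (List (Int × Int))))).2).items

-- ===== PRECONDITION & SPEC =====
def Spec_route_edges (path : List Int) (out : List (String × List (Int × Int))) : Prop := out = route_edges_alt path
instance (path : List Int) (out : List (String × List (Int × Int))) : Decidable (Spec_route_edges path out) := by unfold Spec_route_edges; infer_instance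

-- ===== CLAIM =====
def Claim_equal_route_edges : Prop := ∀ (path : List Int), Dom_route_edges path → Spec_route_edges path (route_edges path)

-- ===== LEMMAS AND PROOFS =====

-- grouping fold (defaultdict(list) appends), used to describe both final dicts
def pvGroup (colored : List (String × (Int × Int))) :
    PySem.Dict String (List (Int × Int)) :=
  colored.foldl (fun d p => d.modify p.1 [] (· ++ [p.2])) PySem.Dict.empty

-- cycle state after the (n+1)-st next()
def pvRot (n : Int) : List String :=
  if PySem.Int.mod n 3 = 0 then ["b", "g", "r"]
  else if PySem.Int.mod n 3 = 1 then ["g", "r", "b"]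
  else ["r", "b", "g"]

-- colored tail: colors of the remaining edges es, given count cnt and previous edge prev
def pvColoredFrom (cnt : Int) (prev : Int × Int) :
    List (Int × Int) → List (String × (Int × Int))
  | [] => []
  | e :: rest =>
      let cnt' := if pvSetEq e prev then cnt + 1 else cnt
      (pvColorOf cnt', e) :: pvColoredFrom cnt' e rest

-- canonical colored edge list of a path, reversal read off the palindromic triple
def pvCL : Int → List Int → List (String × (Int × Int))
  | cnt, a :: b :: c :: rest =>
      (pvColorOf cnt, (a, b)) :: pvCL (if a = c then cnt + 1 else cnt) (b :: c :: rest)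
  | cnt, [a, b] => [(pvColorOf cnt, (a, b))]
  | _, _ => []
termination_by _ l => l.length
decreasing_by all_goals (simp only [List.length_cons]; omega)

-- canonical run splitting of a path at palindromic triples
def pvRunsC : List (Int × Int) → List Int → List (List (Int × Int))
  | run, a :: b :: c :: rest =>
      if a = c then (run ++ [(a, b)]) :: pvRunsC [] (b :: c :: rest)
      else pvRunsC (run ++ [(a, b)]) (b :: c :: rest)
  | run, [a, b] => [run ++ [(a, b)]]
  | _, _ => []
termination_by _ l => l.length
decreasing_by all_goals (simp only [List.length_cons]; omega)

-- coloring the runs cyclically, flattened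
def pvFlat (k : Int) : List (List (Int × Int)) → List (String × (Int × Int))
  | [] => []
  | r :: rs => r.map (fun e => (pvColorOf k, e)) ++ pvFlat (k + 1) rs

-- the last two elements of a::b::l
def pvLastTwo (a b : Int) : List Int → Int × Int
  | [] => (a, b)
  | c :: l => pvLastTwo b c l

lemma pvCycleNext_rot (n : Int) (_h : 0 ≤ n) :
    pvCycleNext (pvRot n) = (pvColorOf (n + 1), pvRot (n + 1)) := by
  have h3 : PySem.Int.mod n 3 = 0 ∨ PySem.Int.mod n 3 = 1 ∨ PySem.Int.mod n 3 = 2 := by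
    rw [PySem.Int.mod_eq_emod_of_pos (by omega)]; omega
  have hs : PySem.Int.mod (n + 1) 3 =
      if PySem.Int.mod n 3 = 2 then 0 else PySem.Int.mod n 3 + 1 := by
    rw [PySem.Int.mod_eq_emod_of_pos (by omega), PySem.Int.mod_eq_emod_of_pos (by omega)]
    omega
  rcases h3 with h3 | h3 | h3 <;>
    · simp only [pvRot, pvColorOf, hs, h3]
      decide

lemma pvGroup_append (L : List (String × (Int × Int))) (p : String × (Int × Int)) :
    pvGroup (L ++ [p]) = (pvGroup L).modify p.1 [] (· ++ [p.2]) := by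
  simp [pvGroup, List.foldl_append]

lemma pvGroup_getD (L : List (String × (Int × Int))) (c : String) :
    (pvGroup L).getD c [] = (L.filter (fun p => p.1 == c)).map (·.2) := by
  simpa using PySem.Dict.getD_foldl_modify_append L PySem.Dict.empty c

lemma pvGroup_contains_last (M : List (String × (Int × Int))) (c : String) (prev : Int × Int) :
    (pvGroup (M ++ [(c, prev)])).contains c = true := by
  by_cases hc : (pvGroup (M ++ [(c, prev)])).contains c = true
  · exact hc
  · exfalso
    have hd := PySem.Dict.getD_of_not_contains (pvGroup (M ++ [(c, prev)]))
      ([] : List (Int × Int)) (k := c) (by simpa using hc)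
    rw [pvGroup_getD] at hd
    simp at hd

-- one step of A from the canonical state
lemma pvStepA_eq (cnt : Int) (h : 0 ≤ cnt) (prev e : Int × Int)
    (M : List (String × (Int × Int))) :
    pvStepA (pvColorOf cnt, pvRot cnt, pvGroup (M ++ [(pvColorOf cnt, prev)])) e =
      (pvColorOf (if pvSetEq e prev then cnt + 1 else cnt),
       pvRot (if pvSetEq e prev then cnt + 1 else cnt),
       pvGroup ((M ++ [(pvColorOf cnt, prev)]) ++
         [(pvColorOf (if pvSetEq e prev then cnt + 1 else cnt), e)])) := by
  have hset : (pvGroup (M ++ [(pvColorOf cnt, prev)])).setdefault (pvColorOf cnt) [] =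
      pvGroup (M ++ [(pvColorOf cnt, prev)]) :=
    PySem.Dict.setdefault_of_contains _ [] (pvGroup_contains_last M _ prev)
  have hcl : (pvGroup (M ++ [(pvColorOf cnt, prev)])).getD (pvColorOf cnt) [] =
      (M.filter (fun p => p.1 == pvColorOf cnt)).map (·.2) ++ [prev] := by
    rw [pvGroup_getD]; simp
  unfold pvStepA
  simp only [hset, hcl]
  by_cases hp : pvSetEq e prev = true
  · simp [hp, pvCycleNext_rot cnt h]
    rw [show M ++ [(pvColorOf cnt, prev), (pvColorOf (cnt + 1), e)] =
        (M ++ [(pvColorOf cnt, prev)]) ++ [(pvColorOf (cnt + 1), e)] by simp,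
      pvGroup_append, pvGroup_append]
    simp [pvGroup_append]
  · simp only [Bool.not_eq_true] at hp
    simp [hp]
    rw [show M ++ [(pvColorOf cnt, prev), (pvColorOf cnt, e)] =
        (M ++ [(pvColorOf cnt, prev)]) ++ [(pvColorOf cnt, e)] by simp,
      pvGroup_append, pvGroup_append]
    simp [pvGroup_append]

-- main invariant for A's loop
lemma pvMainA (es : List (Int × Int)) :
    ∀ (cnt : Int) (prev : Int × Int) (M : List (String × (Int × Int))), 0 ≤ cnt →
      (es.foldl pvStepA (pvColorOf cnt, pvRot cnt, pvGroup (M ++ [(pvColorOf cnt, prev)]))).2.2 =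
        pvGroup ((M ++ [(pvColorOf cnt, prev)]) ++ pvColoredFrom cnt prev es) := by
  induction es with
  | nil => intro cnt prev M _; simp [pvColoredFrom]
  | cons e rest ih =>
      intro cnt prev M h
      rw [List.foldl_cons, pvStepA_eq cnt h prev e M]
      have := ih (if pvSetEq e prev then cnt + 1 else cnt) e
        (M ++ [(pvColorOf cnt, prev)]) (by split <;> omega)
      rw [this]
      simp [pvColoredFrom]

-- the edge list A indexes equals zip(path, path[1:])
lemma pvEdges (path : List Int) :
    (PySem.List.pyRange 0 ((path.length : Int) - 1) 1).map
        (fun i => (PySem.List.pyGetD path i 0, PySem.List.pyGetD path (i + 1) 0)) =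
      path.zip path.tail := by
  apply List.ext_getElem
  · simp [PySem.List.length_pyRange_one]
  · intro k h1 h2
    have hk : k < path.length - 1 := by
      simpa [PySem.List.length_pyRange_one] using h1
    have hi : (PySem.List.pyRange 0 ((path.length : Int) - 1) 1)[k]'(by
        simpa [PySem.List.length_pyRange_one] using hk) = (k : Int) := by
      rw [PySem.List.getElem_pyRange_one]; omega
    simp only [List.getElem_map, hi]
    rw [List.getElem_zip]
    congr 1
    · rw [PySem.List.pyGetD_eq_getElem path 0 (by omega) (by omega)]
      simp only [show ((k : Int)).toNat = k by omega]
    · rw [PySem.List.pyGetD_eq_getElem path 0 (by omega) (by omega)]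
      simp only [show ((k : Int) + 1).toNat = k + 1 by omega]
      simp [List.getElem_tail]

-- two consecutive edges have equal vertex sets iff the outer endpoints coincide
lemma pvSetEq_triple (a b c : Int) : pvSetEq (b, c) (a, b) = decide (a = c) := by
  by_cases h : a = c
  · simp [pvSetEq, h]
  · simp [pvSetEq, h]
    omega

-- A's colored edge list is pvCL
lemma pvCL_eq (l : List Int) :
    ∀ (a b : Int) (cnt : Int),
      pvCL cnt (a :: b :: l) =
        (pvColorOf cnt, (a, b)) :: pvColoredFrom cnt (a, b) ((b :: l).zip l) := by
  induction l with
  | nil => intro a b cnt; simp [pvCL, pvColoredFrom]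
  | cons c l' ih =>
      intro a b cnt
      simp only [pvCL, List.zip_cons_cons, pvColoredFrom, pvSetEq_triple]
      rw [ih b c]
      by_cases h : a = c <;> simp [h]

-- last two elements of the path via negative indexing
lemma pvLastTwo_eq (l : List Int) :
    ∀ (a b : Int),
      (PySem.List.pyGetD (a :: b :: l) (-2) 0, PySem.List.pyGetD (a :: b :: l) (-1) 0) =
        pvLastTwo a b l := by
  induction l with
  | nil =>
      intro a b
      simp [pvLastTwo, PySem.List.pyGetD, PySem.List.pyGet?, PySem.List.pyIdx?]
  | cons c l' ih =>
      intro a b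
      rw [pvLastTwo]
      rw [← ih b c]
      have h2 : PySem.List.pyGetD (a :: b :: c :: l') (-2) 0 =
          PySem.List.pyGetD (b :: c :: l') (-2) 0 := by
        rw [PySem.List.pyGetD_neg_ofNat _ 2 0 (by omega) (by simp),
          PySem.List.pyGetD_neg_ofNat _ 2 0 (by omega) (by simp)]
        have : (a :: b :: c :: l').length - 2 = ((b :: c :: l').length - 2) + 1 := by
          simp
        simp only [this, List.getElem_cons_succ]
      have h1 : PySem.List.pyGetD (a :: b :: c :: l') (-1) 0 =
          PySem.List.pyGetD (b :: c :: l') (-1) 0 := by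
        rw [PySem.List.pyGetD_neg_ofNat _ 1 0 (by omega) (by simp),
          PySem.List.pyGetD_neg_ofNat _ 1 0 (by omega) (by simp)]
        have : (a :: b :: c :: l').length - 1 = ((b :: c :: l').length - 1) + 1 := by
          simp
        simp only [this, List.getElem_cons_succ]
      rw [h2, h1]

-- B's first loop computes the canonical run splitting
lemma pvRuns_eq (l : List Int) :
    ∀ (a b : Int) (acc : List (List (Int × Int))) (run : List (Int × Int)),
      ((((a :: b :: l).zip (b :: l)).zip l).foldl pvStepR (acc, run)).1 ++
          [((((a :: b :: l).zip (b :: l)).zip l).foldl pvStepR (acc, run)).2 ++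
            [pvLastTwo a b l]] = acc ++ pvRunsC run (a :: b :: l) := by
  induction l with
  | nil => intro a b acc run; simp [pvRunsC, pvLastTwo]
  | cons c l' ih =>
      intro a b acc run
      simp only [List.zip_cons_cons, List.foldl_cons, pvRunsC, pvLastTwo]
      have hstep : pvStepR (acc, run) ((a, b), c) =
          if a = c then (acc ++ [run ++ [(a, b)]], []) else (acc, run ++ [(a, b)]) := by
        simp [pvStepR]
      by_cases h : a = c
      · simp only [hstep, if_pos h]
        have := ih b c (acc ++ [run ++ [(a, b)]]) []
        simp only [List.zip_cons_cons] at this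
        rw [this]
        simp
      · simp only [hstep, if_neg h]
        have := ih b c acc (run ++ [(a, b)])
        simp only [List.zip_cons_cons] at this
        rw [this]

-- flattening the cyclically colored runs gives the canonical colored edge list
lemma pvFlat_runs (l : List Int) :
    ∀ (a b : Int) (run : List (Int × Int)) (k : Int),
      pvFlat k (pvRunsC run (a :: b :: l)) =
        run.map (fun e => (pvColorOf k, e)) ++ pvCL k (a :: b :: l) := by
  induction l with
  | nil =>
      intro a b run k
      simp [pvRunsC, pvCL, pvFlat]
  | cons c l' ih =>
      intro a b run k
      simp only [pvRunsC, pvCL]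
      by_cases h : a = c
      · simp only [if_pos h, pvFlat]
        rw [ih b c [] (k + 1)]
        simp
      · simp only [if_neg h]
        rw [ih b c (run ++ [(a, b)]) k]
        simp

-- B's second loop is the grouping fold over the flattened colored runs
lemma pvFoldRuns (runs : List (List (Int × Int))) :
    ∀ (k : Int) (d : PySem.Dict String (List (Int × Int))),
      (runs.foldl
          (fun st2 r =>
            (st2.1 + 1, r.foldl (fun d e => d.modify (pvColorOf st2.1) [] (· ++ [e])) st2.2))
          (k, d)).2 =
        (pvFlat k runs).foldl (fun d p => d.modify p.1 [] (· ++ [p.2])) d := by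
  induction runs with
  | nil => intro k d; simp [pvFlat]
  | cons r rs ih =>
      intro k d
      rw [List.foldl_cons, pvFlat, List.foldl_append, ih]
      congr 1
      rw [List.foldl_map]

-- ===== VERDICT =====
theorem route_edges_spec : Claim_equal_route_edges := by
  intro path _
  unfold Spec_route_edges
  match path with
  | [] =>
      show route_edges [] = route_edges_alt []
      rfl
  | [a] =>
      show route_edges [a] = route_edges_alt [a]
      rfl
  | a :: b :: l =>
      -- A's side: the dict is pvGroup of the canonical colored edge list
      have hA : route_edges (a :: b :: l) = (pvGroup (pvCL 0 (a :: b :: l))).items := by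
        have h1 : route_edges (a :: b :: l) =
            (((PySem.List.pyRange 0 (((a :: b :: l).length : Int) - 1) 1).map
                (fun i => (PySem.List.pyGetD (a :: b :: l) i 0,
                  PySem.List.pyGetD (a :: b :: l) (i + 1) 0))).foldl
              pvStepA
              ((pvCycleNext ["r", "b", "g"]).1, (pvCycleNext ["r", "b", "g"]).2,
                PySem.Dict.empty)).2.2.items := by
          rw [route_edges, List.foldl_map]
        rw [h1, pvEdges]
        simp only [List.tail_cons, List.zip_cons_cons, List.foldl_cons]
        have hfirst : pvStepA ((pvCycleNext ["r", "b", "g"]).1, (pvCycleNext ["r", "b", "g"]).2,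
            PySem.Dict.empty) (a, b) =
              (pvColorOf 0, pvRot 0, pvGroup ([] ++ [(pvColorOf 0, (a, b))])) := by
          simp [pvStepA, pvCycleNext, PySem.Dict.setdefault, PySem.Dict.modify,
            PySem.Dict.getD, PySem.Dict.get?, PySem.Dict.empty, PySem.Dict.insert,
            PySem.Dict.contains, pvGroup, pvColorOf, pvRot, PySem.Int.mod,
            PySem.List.pyGet?, PySem.List.pyIdx?]
        rw [hfirst, pvMainA ((b :: l).zip l) 0 (a, b) [] le_rfl]
        rw [pvCL_eq l a b 0]
        simp
      -- B's side: the dict is pvGroup of the flattened colored runs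
      have hB : route_edges_alt (a :: b :: l) = (pvGroup (pvCL 0 (a :: b :: l))).items := by
        have hs2 : PySem.List.slice (a :: b :: l) (some 2) none = l := by
          rw [show (2 : Int) = ((2 : Nat) : Int) from rfl, PySem.List.slice_from_natCast]
          rfl
        have hlen : 2 ≤ (a :: b :: l).length := by simp
        have hlast := pvLastTwo_eq l a b
        have hruns := pvRuns_eq l a b [] []
        simp only [List.nil_append] at hruns
        simp only [route_edges_alt, PySem.List.slice_from_one, hs2, List.tail_cons,
          if_pos hlen, hlast]
        generalize hst : (((a :: b :: l).zip (b :: l)).zip l).foldl pvStepR ([], []) = st0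
        rw [hst] at hruns
        -- the final run is nonempty, so it is appended
        rw [if_neg (by simp : ¬((st0.2 ++ [pvLastTwo a b l]).isEmpty = true))]
        rw [hruns, pvFoldRuns (pvRunsC [] (a :: b :: l)) 0 PySem.Dict.empty,
          pvFlat_runs l a b [] 0]
        simp [pvGroup]
      rw [hA, hB]
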